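-- pv_equiv track=rewrite | github.com/Dev-SoUni/algorithm | Python/programmers/연습문제/155652_둘만의 암호/solution.py | solution
-- ===== SOURCE A (Python) =====
-- alpa = ["a","b","c","d","e","f","g","h","i","j","k","l","m","n","o","p","q","r","s","t","u","v","w","x","y","z"]
--
-- def solution(s, skip, index):
--     answer = []
--     skip = list(skip)
--
--     for it in s:
--         text_index = alpa.index(it)
--         count = 0
--
--         while count != index:
--             text_index += 1
--             if text_index > len(alpa) - 1:
--                 text_index -= len(alpa)
--             if alpa[text_index] not in skip:
--                 count += 1
--
--         answer.append(alpa[text_index])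
--
--     answer_text = ""
--     for a in answer:
--         answer_text += a
--
--     return answer_text
-- ===== SOURCE B (Python) =====
-- def solution(s, skip, index):
--     banned = set(skip)
--     avail = [i for i in range(26) if chr(97 + i) not in banned]
--     m = len(avail)
--     out = []
--     for ch in s:
--         p = ord(ch) - 97
--         r = sum(1 for q in avail if q <= p)
--         out.append(chr(97 + avail[(r + index - 1) % m]))
--     return "".join(out)
-- ===== Notes on version B (the rewrite author's own statement) =====
-- stated objective: faster
-- what changed: A advances a counter one alphabet position at a time (index iterations of a skip-scanning while loop per character); B precomputes the list of available letter positions once and jumps each character directly with one modular-arithmetic index computation.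
-- outside the precondition, e.g. on solution('b', 'b', 0): A returns 'b', B returns 'a'; on solution('ab', 'a', 0): A returns 'ab', B returns 'zb'
import Mathlib
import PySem

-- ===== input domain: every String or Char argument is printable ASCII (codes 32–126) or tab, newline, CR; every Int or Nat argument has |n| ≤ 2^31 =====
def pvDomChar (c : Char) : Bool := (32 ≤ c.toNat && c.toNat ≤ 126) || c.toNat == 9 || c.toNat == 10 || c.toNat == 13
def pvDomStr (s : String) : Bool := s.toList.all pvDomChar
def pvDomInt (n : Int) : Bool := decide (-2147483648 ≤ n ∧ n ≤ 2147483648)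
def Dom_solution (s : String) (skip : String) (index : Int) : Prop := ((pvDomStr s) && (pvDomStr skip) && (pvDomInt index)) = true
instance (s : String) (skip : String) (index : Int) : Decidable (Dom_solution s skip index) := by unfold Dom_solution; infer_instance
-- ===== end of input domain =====

-- B replaces A's per-character step-by-step walk (index iterations of a skip-scanning
-- while loop) by one modular-arithmetic jump into the precomputed list of available
-- letter positions; equivalence is proved on Pre_ (all-lowercase s, index ≥ 1 unless s
-- is empty, and not every letter skipped).

-- ===== PORT A =====
def alpa : List Char :=
  ['a','b','c','d','e','f','g','h','i','j','k','l','m','n','o','p','q','r','s','t','u','v','w','x','y','z']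

-- the inner `while count != index` loop; fuel only makes the recursion structural
-- (Pre_ guarantees 26 * index.toNat + 1 fuel is never exhausted; at fuel 0 the
-- current text_index is returned, a case Pre_ excludes)
def solWhile (skipL : List Char) (index : Int) : Nat → Nat → Int → Nat
  | 0, textIndex, _ => textIndex
  | fuel + 1, textIndex, count =>
    if count ≠ index then
      let t1 := textIndex + 1
      let t2 := if t1 > alpa.length - 1 then t1 - alpa.length else t1
      if alpa.getD t2 ' ' ∉ skipL then solWhile skipL index fuel t2 (count + 1)
      else solWhile skipL index fuel t2 count
    else textIndex

def solution (s : String) (skip : String) (index : Int) : String :=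
  let skipL := skip.toList                -- skip = list(skip)
  let answer : List Char := s.toList.foldl (fun acc it =>
    match PySem.List.index? alpa it with  -- alpa.index(it); none = ValueError, excluded by Pre_
    | some ti => acc ++ [alpa.getD (solWhile skipL index (26 * index.toNat + 1) ti 0) ' ']
    | none => acc) []
  answer.foldl (fun acc a => acc.push a) ""   -- answer_text += a

-- ===== PORT B =====
def solution_alt (s : String) (skip : String) (index : Int) : String :=
  let banned : PySem.Set Char := PySem.Set.ofList skip.toList            -- set(skip)
  let avail : List Nat :=
    (List.range 26).filter (fun i => !(PySem.Set.contains banned (Char.ofNat (97 + i))))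
  let m : Int := (avail.length : Int)
  let out : List String := s.toList.map (fun ch =>
    let p : Int := (ch.toNat : Int) - 97                                 -- ord(ch) - 97
    let r : Int := ((avail.countP (fun (q : Nat) => decide ((q : Int) ≤ p))) : Int)
    -- avail[(r + index - 1) % m]; m = 0 is a ZeroDivisionError in Python, excluded by
    -- Pre_ whenever s is nonempty, so the getD default is never relevant there
    String.singleton (Char.ofNat (97 + avail.getD (PySem.Int.mod (r + index - 1) m).toNat 0)))
  PySem.Str.join "" out                                                  -- "".join(out)

-- ===== PRECONDITION & SPEC =====
-- Pre_ excludes: s with a character outside 'a'..'z' (alpa.index raises ValueError);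
-- nonempty s with index ≤ 0 (index < 0 never terminates; index = 0 is outside the
-- problem's stated domain 1 ≤ index and the two programs differ there, see "cites");
-- nonempty s with every letter skipped (the while loop never terminates).
def Pre_solution (s : String) (skip : String) (index : Int) : Prop :=
  s.toList.all (fun c => decide ('a' ≤ c) && decide (c ≤ 'z')) = true ∧
  (s.toList = [] ∨ (1 ≤ index ∧
    "abcdefghijklmnopqrstuvwxyz".toList.any (fun c => !(skip.toList.contains c)) = true))
instance (s : String) (skip : String) (index : Int) : Decidable (Pre_solution s skip index) := by
  unfold Pre_solution; infer_instance

def pvWitness_solution : String × String × Int := ("hello", "l", 5)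

def Spec_solution (s : String) (skip : String) (index : Int) (out : String) : Prop := out = solution_alt s skip index
instance (s : String) (skip : String) (index : Int) (out : String) : Decidable (Spec_solution s skip index out) := by unfold Spec_solution; infer_instance

-- ===== CLAIM (what is proved, stated in full; the proofs are below) =====
def Claim_equal_solution : Prop := ∀ (s : String) (skip : String) (index : Int), Dom_solution s skip index → Pre_solution s skip index → Spec_solution s skip index (solution s skip index)

-- ===== LEMMAS AND PROOFS =====
def availL (skipL : List Char) : List Nat :=
  (List.range 26).filter (fun i => decide (Char.ofNat (97 + i) ∉ skipL))

theorem availL_eq (skipL : List Char) :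
    (List.range 26).filter
      (fun i => !(PySem.Set.contains (PySem.Set.ofList skipL) (Char.ofNat (97 + i)))) =
    availL skipL := by
  unfold availL
  apply List.filter_congr
  intro i _
  simp [PySem.Set.contains, PySem.Set.mem_ofList]

theorem mem_availL {skipL : List Char} {a : Nat} :
    a ∈ availL skipL ↔ a < 26 ∧ Char.ofNat (97 + a) ∉ skipL := by
  simp [availL, List.mem_filter, List.mem_range]

theorem pairwise_availL (skipL : List Char) : (availL skipL).Pairwise (· < ·) :=
  List.Pairwise.sublist List.filter_sublist List.pairwise_lt_range

theorem countP_le_getD : ∀ (l : List Nat), l.Pairwise (· < ·) →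
    ∀ j, j < l.length → l.countP (fun q => decide (q ≤ l.getD j 0)) = j + 1 := by
  intro l
  induction l with
  | nil => intro _ j h; simp at h
  | cons x l ih =>
    intro hp j h
    have hx := (List.pairwise_cons.1 hp).1
    have hl := (List.pairwise_cons.1 hp).2
    cases j with
    | zero =>
      rw [List.countP_cons]
      have h0 : (x :: l).getD 0 0 = x := rfl
      rw [h0]
      have hz : l.countP (fun q => decide (q ≤ x)) = 0 := by
        apply List.countP_eq_zero.2
        intro a ha
        have := hx a ha
        simp; omega
      simp [hz]
    | succ j =>
      have hj : j < l.length := by simpa using h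
      have hget : (x :: l).getD (j+1) 0 = l.getD j 0 := rfl
      rw [hget, List.countP_cons, ih hl j hj]
      have hge : l.getD j 0 = l[j] := List.getD_eq_getElem l 0 hj
      have hm : l[j] ∈ l := List.getElem_mem hj
      have hxle : x ≤ l.getD j 0 := by rw [hge]; exact le_of_lt (hx _ hm)
      simp only [List.getD] at hxle ⊢
      simp [hxle]

theorem sorted_rank_lt {l : List Nat} (hs : l.Pairwise (· < ·)) (p : Nat)
    (h : l.countP (fun q => decide (q ≤ p)) < l.length) :
    p < l.getD (l.countP (fun q => decide (q ≤ p))) 0 ∧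
      ∀ a ∈ l, p < a → l.getD (l.countP (fun q => decide (q ≤ p))) 0 ≤ a := by
  induction l with
  | nil => simp at h
  | cons x l ih =>
    have hx := (List.pairwise_cons.1 hs).1
    have hl := (List.pairwise_cons.1 hs).2
    by_cases hxp : x ≤ p
    · have hc : (x :: l).countP (fun q => decide (q ≤ p)) =
          l.countP (fun q => decide (q ≤ p)) + 1 := by
        rw [List.countP_cons]; simp [hxp]
      rw [hc] at h ⊢
      have h' : l.countP (fun q => decide (q ≤ p)) < l.length := by simpa using h
      obtain ⟨h1, h2⟩ := ih hl h'
      have hg : (x :: l).getD (l.countP (fun q => decide (q ≤ p)) + 1) 0 =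
          l.getD (l.countP (fun q => decide (q ≤ p))) 0 := rfl
      rw [hg]
      refine ⟨h1, ?_⟩
      intro a ha hpa
      simp at ha
      rcases ha with rfl | ha
      · omega
      · exact h2 a ha hpa
    · have hc : (x :: l).countP (fun q => decide (q ≤ p)) = 0 := by
        rw [List.countP_cons]
        have hz : l.countP (fun q => decide (q ≤ p)) = 0 := by
          apply List.countP_eq_zero.2
          intro a ha
          have := hx a ha
          simp; omega
        simp [hz, hxp]
      rw [hc]
      have hg : (x :: l).getD 0 0 = x := rfl
      rw [hg]
      refine ⟨by omega, ?_⟩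
      intro a ha _
      simp at ha
      rcases ha with rfl | ha
      · exact le_refl _
      · exact le_of_lt (hx a ha)

theorem sorted_rank_full {l : List Nat} (p : Nat)
    (h : l.countP (fun q => decide (q ≤ p)) = l.length) : ∀ a ∈ l, a ≤ p := by
  intro a ha
  have := List.countP_eq_length.1 h a ha
  simpa using this

theorem sorted_head_le {l : List Nat} (hs : l.Pairwise (· < ·)) :
    ∀ a ∈ l, l.getD 0 0 ≤ a := by
  cases l with
  | nil => simp
  | cons x l =>
    intro a ha
    simp at ha
    rcases ha with rfl | ha
    · simp
    · simpa using le_of_lt ((List.pairwise_cons.1 hs).1 a ha)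

theorem alpa_getD : ∀ t, t < 26 → alpa.getD t ' ' = Char.ofNat (97 + t) := by decide

theorem alpa_len : alpa.length = 26 := by decide

theorem solWhile_done (skipL : List Char) (index : Int) (fuel t : Nat) :
    solWhile skipL index fuel t index = t := by
  cases fuel <;> simp [solWhile]

theorem solWhile_steps (skipL : List Char) (index : Int) :
    ∀ (k fuel t : Nat) (count : Int), t < 26 → 1 ≤ k → k ≤ fuel → count ≠ index →
    (∀ j, 1 ≤ j → j < k → Char.ofNat (97 + (t + j) % 26) ∈ skipL) →
    Char.ofNat (97 + (t + k) % 26) ∉ skipL →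
    solWhile skipL index fuel t count =
      solWhile skipL index (fuel - k) ((t + k) % 26) (count + 1) := by
  intro k
  induction k with
  | zero => intro fuel t count _ h1; omega
  | succ k ih =>
    intro fuel t count ht _ hk hcnt hskip havail
    obtain ⟨fuel', rfl⟩ : ∃ f, fuel = f + 1 := ⟨fuel - 1, by omega⟩
    have hstep : (if t + 1 > alpa.length - 1 then t + 1 - alpa.length else t + 1) = (t + 1) % 26 := by
      rw [alpa_len]; split <;> omega
    have ht2 : (t + 1) % 26 < 26 := Nat.mod_lt _ (by omega)
    rw [solWhile]
    simp only [if_pos hcnt, hstep, alpa_getD _ ht2]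
    cases k with
    | zero =>
      have h1 : (t + 1) % 26 = (t + 1) % 26 := rfl
      rw [if_pos (by simpa using havail)]
      simp
    | succ k =>
      have hin : Char.ofNat (97 + (t + 1) % 26) ∈ skipL := hskip 1 le_rfl (by omega)
      rw [if_neg (by simpa using hin)]
      have := ih fuel' ((t + 1) % 26) count ht2 (by omega) (by omega) hcnt
        (fun j hj1 hj2 => by
          have : ((t + 1) % 26 + j) % 26 = (t + (j + 1)) % 26 := by omega
          rw [this]
          exact hskip (j + 1) (by omega) (by omega))
        (by
          have : ((t + 1) % 26 + (k + 1)) % 26 = (t + (k + 1 + 1)) % 26 := by omega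
          rw [this]; exact havail)
      rw [this]
      congr 1
      · omega
      · omega

theorem next_avail (skipL : List Char) (t : Nat) (ht : t < 26)
    (hne : availL skipL ≠ []) :
    (availL skipL).getD ((availL skipL).countP (fun q => decide (q ≤ t)) % (availL skipL).length) 0 ∈ availL skipL ∧
    1 ≤ ((availL skipL).getD ((availL skipL).countP (fun q => decide (q ≤ t)) % (availL skipL).length) 0 + 26 - t - 1) % 26 + 1 ∧
    ((availL skipL).getD ((availL skipL).countP (fun q => decide (q ≤ t)) % (availL skipL).length) 0 + 26 - t - 1) % 26 + 1 ≤ 26 ∧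
    (t + (((availL skipL).getD ((availL skipL).countP (fun q => decide (q ≤ t)) % (availL skipL).length) 0 + 26 - t - 1) % 26 + 1)) % 26
      = (availL skipL).getD ((availL skipL).countP (fun q => decide (q ≤ t)) % (availL skipL).length) 0 ∧
    (∀ j, 1 ≤ j → j < ((availL skipL).getD ((availL skipL).countP (fun q => decide (q ≤ t)) % (availL skipL).length) 0 + 26 - t - 1) % 26 + 1 →
      Char.ofNat (97 + (t + j) % 26) ∈ skipL) ∧
    (availL skipL).countP (fun q' => decide (q' ≤ (availL skipL).getD ((availL skipL).countP (fun q => decide (q ≤ t)) % (availL skipL).length) 0))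
      = (availL skipL).countP (fun q => decide (q ≤ t)) % (availL skipL).length + 1 := by
  set A := availL skipL with hA
  have hs := pairwise_availL skipL
  set r := A.countP (fun q => decide (q ≤ t)) with hrdef
  have hm : 0 < A.length := List.length_pos_of_ne_nil hne
  have hrle : r ≤ A.length := List.countP_le_length ..
  set q := A.getD (r % A.length) 0 with hqdef
  have hrm : r % A.length < A.length := Nat.mod_lt _ hm
  have hqmem : q ∈ A := by
    rw [hqdef, List.getD_eq_getElem A 0 hrm]
    exact List.getElem_mem hrm
  have hq26 : q < 26 := (mem_availL.1 hqmem).1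
  have hcount : A.countP (fun q' => decide (q' ≤ q)) = r % A.length + 1 :=
    countP_le_getD A hs (r % A.length) hrm
  refine ⟨hqmem, by omega, by omega, ?_, ?_, hcount⟩
  · -- (t + k) % 26 = q
    rcases Nat.lt_or_ge r A.length with hr | hr
    · have hre : r % A.length = r := Nat.mod_eq_of_lt hr
      have := sorted_rank_lt hs t hr
      rw [← hrdef, ← hre, ← hqdef] at this
      have htq : t < q := this.1
      omega
    · have hre : r = A.length := le_antisymm hrle hr
      have hqt : q ≤ t := sorted_rank_full t (by rw [← hrdef]; exact hre) q hqmem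
      omega
  · -- skipped letters in between
    intro j hj1 hj2
    by_contra hnot
    have hu26 : (t + j) % 26 < 26 := Nat.mod_lt _ (by omega)
    have humem : (t + j) % 26 ∈ A := mem_availL.2 ⟨hu26, hnot⟩
    rcases Nat.lt_or_ge r A.length with hr | hr
    · have hre : r % A.length = r := Nat.mod_eq_of_lt hr
      have hrl := sorted_rank_lt hs t hr
      rw [← hrdef, ← hre, ← hqdef] at hrl
      have htq : t < q := hrl.1
      -- k = q - t, so u = t + j with t < u < q
      have hk : (q + 26 - t - 1) % 26 + 1 = q - t := by omega
      rw [hk] at hj2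
      have hu : (t + j) % 26 = t + j := Nat.mod_eq_of_lt (by omega)
      have := hrl.2 _ humem (by omega)
      omega
    · have hre : r = A.length := le_antisymm hrle hr
      have hall : ∀ a ∈ A, a ≤ t := sorted_rank_full t (by rw [← hrdef]; exact hre)
      have hq0 : q = A.getD 0 0 := by
        rw [hqdef, hre, Nat.mod_self]
      have hqle : ∀ a ∈ A, q ≤ a := by rw [hq0]; exact sorted_head_le hs
      have hk : (q + 26 - t - 1) % 26 + 1 = q + 26 - t := by
        have : q ≤ t := hall q hqmem
        omega
      rw [hk] at hj2
      rcases Nat.lt_or_ge (t + j) 26 with hlt | hge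
      · have hu : (t + j) % 26 = t + j := Nat.mod_eq_of_lt hlt
        have := hall _ humem
        omega
      · have hu : (t + j) % 26 = t + j - 26 := by omega
        have := hqle _ humem
        omega

theorem solWhile_eq (skipL : List Char) (index : Int) (hne : availL skipL ≠ []) :
    ∀ (n : Nat), 1 ≤ n → ∀ (fuel t : Nat) (count : Int), 26 * n ≤ fuel → t < 26 →
    count + n = index →
    solWhile skipL index fuel t count =
      (availL skipL).getD
        (((availL skipL).countP (fun q => decide (q ≤ t)) + n - 1) % (availL skipL).length) 0 := by
  intro n
  induction n with
  | zero => intro h; omega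
  | succ n ih =>
    intro _ fuel t count hfuel ht hcnt
    obtain ⟨hqmem, hk1, hk26, hstep, hmid, hcount⟩ := next_avail skipL t ht hne
    have hq26 : (availL skipL).getD ((availL skipL).countP (fun q => decide (q ≤ t)) % (availL skipL).length) 0 < 26 :=
      (mem_availL.1 hqmem).1
    have hne' : count ≠ index := by
      intro h; rw [h] at hcnt; omega
    rw [solWhile_steps skipL index _ fuel t count ht hk1 (by omega) hne' hmid
      (by rw [hstep]; exact (mem_availL.1 hqmem).2)]
    rw [hstep]
    cases n with
    | zero =>
      have : count + 1 = index := by push_cast at hcnt; omega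
      rw [this, solWhile_done]
      simp
    | succ n =>
      rw [ih (by omega) _ _ (count + 1) (by omega) hq26 (by push_cast at hcnt ⊢; omega)]
      rw [hcount]
      have hidx : ((availL skipL).countP (fun q => decide (q ≤ t)) % (availL skipL).length + 1 + (n + 1) - 1) % (availL skipL).length
          = ((availL skipL).countP (fun q => decide (q ≤ t)) + (n + 1 + 1) - 1) % (availL skipL).length := by
        have h2 : (availL skipL).countP (fun q => decide (q ≤ t)) % (availL skipL).length + 1 + (n + 1) - 1
            = (availL skipL).countP (fun q => decide (q ≤ t)) % (availL skipL).length + (n + 1) := by omega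
        rw [h2, Nat.mod_add_mod]
        congr 1
      rw [hidx]

theorem foldl_push_toList : ∀ (l : List Char) (s : String),
    (l.foldl (fun acc a => acc.push a) s).toList = s.toList ++ l := by
  intro l
  induction l with
  | nil => simp
  | cons c l ih => intro s; simp [List.foldl_cons, ih, String.toList_push]

theorem alpha_range : ∀ c ∈ "abcdefghijklmnopqrstuvwxyz".toList, 97 ≤ c.toNat ∧ c.toNat ≤ 122 := by
  have h : ("abcdefghijklmnopqrstuvwxyz".toList.all
      (fun c => decide (97 ≤ c.toNat) && decide (c.toNat ≤ 122))) = true := by decide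
  simp only [List.all_eq_true, Bool.and_eq_true, decide_eq_true_eq] at h
  exact h

theorem index?_alpa : ∀ k, k < 123 → 97 ≤ k → PySem.List.index? alpa (Char.ofNat k) = some (k - 97) := by decide

-- ===== VERDICT (by name: the statement is the Claim_ definition above) =====
set_option maxRecDepth 8192 in
set_option maxHeartbeats 1000000 in
theorem solution_spec : Claim_equal_solution := by
  intro s skip index _ hpre
  unfold Spec_solution
  obtain ⟨hlow, hrest⟩ := hpre
  simp only [List.all_eq_true, Bool.and_eq_true, decide_eq_true_eq] at hlow
  apply String.toList_injective
  rcases hrest with hnil | ⟨hidx1, hany⟩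
  · simp only [solution, solution_alt, hnil]
    rw [foldl_push_toList]
    simp [PySem.Str.toList_join, PySem.Chars.join, List.intercalate]
  · have hne : availL skip.toList ≠ [] := by
      simp only [List.any_eq_true, Bool.not_eq_true', List.contains_eq_mem,
        decide_eq_false_iff_not] at hany
      obtain ⟨c, hc, hnot⟩ := hany
      obtain ⟨h97, h122⟩ := alpha_range c hc
      have hxe : Char.ofNat (97 + (c.toNat - 97)) = c := by
        rw [show 97 + (c.toNat - 97) = c.toNat by omega]
        exact Char.ofNat_toNat c
      exact List.ne_nil_of_mem ((mem_availL (a := c.toNat - 97)).2 ⟨by omega, by rwa [hxe]⟩)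
    have hm : 0 < (availL skip.toList).length := List.length_pos_of_ne_nil hne
    have hnidx : ((index.toNat : Nat) : Int) = index := Int.toNat_of_nonneg (by omega)
    have hn1 : 1 ≤ index.toNat := by omega
    have hchar : ∀ c ∈ s.toList, 97 ≤ c.toNat ∧ c.toNat ≤ 122 := by
      intro c hc
      obtain ⟨h1, h2⟩ := hlow c hc
      constructor
      · have := h1; simp [Char.le_def] at this; exact this
      · have := h2; simp [Char.le_def] at this; exact this
    clear hlow
    set g : Char → Char := fun ch =>
      Char.ofNat (97 + (availL skip.toList).getD
        (((availL skip.toList).countP (fun q => decide (q ≤ ch.toNat - 97)) + index.toNat - 1) %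
          (availL skip.toList).length) 0) with hgdef
    have hgq : ∀ p : Nat,
        (availL skip.toList).getD
          (((availL skip.toList).countP (fun q => decide (q ≤ p)) + index.toNat - 1) %
            (availL skip.toList).length) 0 < 26 := by
      intro p
      have hlt : ((availL skip.toList).countP (fun q => decide (q ≤ p)) + index.toNat - 1) %
          (availL skip.toList).length < (availL skip.toList).length := Nat.mod_lt _ hm
      rw [List.getD_eq_getElem _ 0 hlt]
      exact (mem_availL.1 (List.getElem_mem hlt)).1
    -- A side
    have hA : (solution s skip index).toList = s.toList.map g := by
      simp only [solution]
      rw [foldl_push_toList]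
      rw [PySem.List.foldl_congr_mem _ _ (fun (acc : List Char) it => acc ++ [g it]) _ ?_]
      · rw [PySem.List.foldl_append_singleton_eq_map]
        simp
      · intro acc x hx
        obtain ⟨h97, h122⟩ := hchar x hx
        have hp26 : x.toNat - 97 < 26 := by omega
        have hidx : PySem.List.index? alpa x = some (x.toNat - 97) := by
          have := index?_alpa x.toNat (by omega) h97
          rwa [Char.ofNat_toNat] at this
        simp only [hidx]
        rw [solWhile_eq skip.toList index hne index.toNat hn1 (26 * index.toNat + 1)
          (x.toNat - 97) 0 (by omega) hp26 (by rw [zero_add]; exact hnidx)]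
        rw [alpa_getD _ (hgq _)]
    -- B side
    have hB : (solution_alt s skip index).toList = s.toList.map g := by
      simp only [solution_alt]
      rw [availL_eq, PySem.Str.toList_join, List.map_map]
      rw [← PySem.Chars.join_nil_singletons (s.toList.map g)]
      congr 1
      rw [List.map_map]
      apply List.map_congr_left
      intro x hx
      obtain ⟨h97, h122⟩ := hchar x hx
      simp only [Function.comp_apply, String.toList_singleton]
      congr 2
      have hcnt : (availL skip.toList).countP (fun (q : Nat) => decide ((q : Int) ≤ (x.toNat : Int) - 97)) =
          (availL skip.toList).countP (fun q => decide (q ≤ x.toNat - 97)) := by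
        apply List.countP_congr
        intro a _
        constructor <;> intro h <;> simp at h ⊢ <;> omega
      rw [hcnt]
      have hcast : ((((availL skip.toList).countP (fun q => decide (q ≤ x.toNat - 97)) : Nat) : Int)
          + index - 1) =
          ((((availL skip.toList).countP (fun q => decide (q ≤ x.toNat - 97)) + index.toNat - 1 : Nat)) : Int) := by
        omega
      rw [hcast, PySem.Int.mod_natCast, Int.toNat_natCast]
    rw [hA, hB]
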